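-- pv_equiv track=rewrite | github.com/anonymous-conf-medians/dp-medians | cdf_median.py | flip_level
-- ===== SOURCE A (Python) =====
-- def flip_level(level, index, node_vals):
--     index_bin_string = bin(index)[2:].zfill(level)
--     start = 0
--     end = len(node_vals)
--     for c in index_bin_string:
--         mid = int((start + end)/2)
--         if c == '1':
--             flipped_vals = node_vals[mid:end]
--             flipped_vals.extend(node_vals[start:mid])
--             node_vals = [flipped_vals[i - start] if (i >= start and i < end) else node_vals[i] for i in range(len(node_vals))]
--             start = mid
--         else:
--             end = mid
--     return node_vals
-- ===== SOURCE B (Python) =====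
-- def flip_level(level, index, node_vals):
--     bits = bin(index)[2:].zfill(level)
--     seg = list(node_vals)
--     left = []   # frozen pieces to the left of the active segment, in order
--     right = []  # frozen pieces to the right, pushed as a stack
--     for c in bits:
--         m = len(seg) // 2
--         if c == '1':
--             new = seg[m:] + seg[:m]
--             left.append(new[:m])
--             seg = new[m:]
--         else:
--             right.append(seg[m:])
--             seg = seg[:m]
--     out = []
--     for p in left:
--         out += p
--     out += seg
--     for p in reversed(right):
--         out += p
--     return out
-- ===== Notes on version B (the rewrite author's own statement) =====
-- stated objective: faster
-- what changed: B recurses on the bit string carrying only the halving active segment and concatenates the untouched pieces back, instead of A's rebuilding of the whole list with a full-length comprehension at every '1' bit.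
import Mathlib
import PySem

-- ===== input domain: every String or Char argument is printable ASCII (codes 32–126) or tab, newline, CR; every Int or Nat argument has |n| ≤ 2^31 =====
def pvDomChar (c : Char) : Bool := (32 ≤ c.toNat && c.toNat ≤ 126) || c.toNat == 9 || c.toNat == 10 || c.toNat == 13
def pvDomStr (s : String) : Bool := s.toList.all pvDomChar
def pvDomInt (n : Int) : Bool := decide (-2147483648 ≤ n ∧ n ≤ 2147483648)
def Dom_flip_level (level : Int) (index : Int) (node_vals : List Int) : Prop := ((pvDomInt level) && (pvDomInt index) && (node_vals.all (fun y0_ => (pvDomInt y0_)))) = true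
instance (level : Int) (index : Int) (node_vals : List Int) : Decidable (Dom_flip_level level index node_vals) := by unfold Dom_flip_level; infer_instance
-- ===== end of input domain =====

-- B replaces A's per-bit rebuild of the whole list (a full-length comprehension per '1' bit)
-- by a single pass that carries only the halving active segment and stacks the frozen pieces,
-- concatenated once at the end (objective: faster).
-- Both ports share pvBits, the port of the identical Python line 'bin(index)[2:].zfill(level)' in Source A and Source B.

-- ===== PORT A =====
-- binary digits of a positive Nat, MSB first (hand port of bin(); exact for Nat inputs)
def pvNatBin : Nat → List Char
  | 0 => []
  | n+1 => pvNatBin ((n+1)/2) ++ [if (n+1) % 2 = 1 then '1' else '0']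
decreasing_by exact Nat.div_lt_self (Nat.succ_pos n) (by norm_num)

-- bin(index)[2:] : for n ≥ 0 the binary digits ('0' for 0); for n < 0, bin gives '-0b…' so [2:] is 'b' ++ digits
def pvBinTail (index : Int) : List Char :=
  if index < 0 then 'b' :: (if index = 0 then ['0'] else pvNatBin (-index).toNat)
  else if index = 0 then ['0'] else pvNatBin index.toNat

-- bin(index)[2:].zfill(level): left-pad with '0' to length level (the first char is never '+'/'-',
-- so zfill's sign rule never fires; negative level pads nothing, like Python)
def pvBits (level : Int) (index : Int) : List Char :=
  let s := pvBinTail index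
  List.replicate (level.toNat - s.length) '0' ++ s

-- one iteration of A's loop over the bit characters; state = (start, end, node_vals)
-- mid: int((start+end)/2) with start,end the nonnegative in-range bounds A maintains = floor division
def flipStepA (st : Int × Int × List Int) (c : Char) : Int × Int × List Int :=
  let s := st.1
  let e := st.2.1
  let vals := st.2.2
  let mid := PySem.Int.floordiv (s + e) 2
  if c = '1' then
    let flipped := PySem.List.slice vals (some mid) (some e) ++ PySem.List.slice vals (some s) (some mid)
    let vals' := (PySem.List.pyRange 0 (vals.length : Int) 1).map
        (fun i => if s ≤ i ∧ i < e then PySem.List.pyGetD flipped (i - s) 0 else PySem.List.pyGetD vals i 0)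
    (mid, e, vals')
  else
    (s, mid, vals)

def flip_level (level : Int) (index : Int) (node_vals : List Int) : List Int :=
  ((pvBits level index).foldl flipStepA (0, (node_vals.length : Int), node_vals)).2.2

-- ===== PORT B =====
-- one iteration of Source B's loop; state = (left pieces, active segment, right pieces stack)
def flipStepB (st : List (List Int) × List Int × List (List Int)) (c : Char) :
    List (List Int) × List Int × List (List Int) :=
  let left := st.1
  let seg := st.2.1
  let right := st.2.2
  let m := seg.length / 2
  if c = '1' then
    let nw := seg.drop m ++ seg.take m
    (left ++ [nw.take m], nw.drop m, right)
  else
    (left, seg.take m, right ++ [seg.drop m])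

def flip_level_alt (level : Int) (index : Int) (node_vals : List Int) : List Int :=
  let st := (pvBits level index).foldl flipStepB ([], node_vals, [])
  st.1.flatten ++ st.2.1 ++ st.2.2.reverse.flatten

-- ===== PRECONDITION & SPEC =====
def Spec_flip_level (level : Int) (index : Int) (node_vals : List Int) (out : List Int) : Prop := out = flip_level_alt level index node_vals
instance (level : Int) (index : Int) (node_vals : List Int) (out : List Int) : Decidable (Spec_flip_level level index node_vals out) := by unfold Spec_flip_level; infer_instance

-- ===== CLAIM (what is proved, stated in full; the proofs are below) =====
def Claim_equal_flip_level : Prop := ∀ (level : Int) (index : Int) (node_vals : List Int), Dom_flip_level level index node_vals → Spec_flip_level level index node_vals (flip_level level index node_vals)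

-- ===== LEMMAS AND PROOFS =====

-- proof-side helper: what one pass of B computes on the active segment alone
def flipSegB : List Char → List Int → List Int
  | [], seg => seg
  | c :: rest, seg =>
    let m := seg.length / 2
    if c = '1' then
      let nw := seg.drop m ++ seg.take m
      nw.take m ++ flipSegB rest (nw.drop m)
    else
      flipSegB rest (seg.take m) ++ seg.drop m

-- B's fold concatenates the frozen pieces around flipSegB of the segment
lemma foldB_eq (bits : List Char) : ∀ (left : List (List Int)) (seg : List Int) (right : List (List Int)),
    ((bits.foldl flipStepB (left, seg, right)).1.flatten
      ++ (bits.foldl flipStepB (left, seg, right)).2.1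
      ++ (bits.foldl flipStepB (left, seg, right)).2.2.reverse.flatten)
    = left.flatten ++ flipSegB bits seg ++ right.reverse.flatten := by
  induction bits with
  | nil => intro left seg right; simp [flipSegB]
  | cons c rest ih =>
    intro left seg right
    rw [List.foldl_cons]
    by_cases hc : c = '1'
    · have hstep : flipStepB (left, seg, right) c
          = (left ++ [((seg.drop (seg.length / 2) ++ seg.take (seg.length / 2)).take (seg.length / 2))],
             (seg.drop (seg.length / 2) ++ seg.take (seg.length / 2)).drop (seg.length / 2), right) := by
        simp only [flipStepB]
        rw [hc, if_pos rfl]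
      rw [hstep, ih]
      have hB : flipSegB (c :: rest) seg
          = ((seg.drop (seg.length / 2) ++ seg.take (seg.length / 2)).take (seg.length / 2))
            ++ flipSegB rest ((seg.drop (seg.length / 2) ++ seg.take (seg.length / 2)).drop (seg.length / 2)) := by
        simp only [flipSegB]
        rw [hc, if_pos rfl]
      rw [hB]
      simp [List.append_assoc]
    · have hstep : flipStepB (left, seg, right) c
          = (left, seg.take (seg.length / 2), right ++ [seg.drop (seg.length / 2)]) := by
        simp only [flipStepB]
        rw [if_neg hc]
      rw [hstep, ih]
      have hB : flipSegB (c :: rest) seg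
          = flipSegB rest (seg.take (seg.length / 2)) ++ seg.drop (seg.length / 2) := by
        simp only [flipSegB]
        rw [if_neg hc]
      rw [hB]
      simp [List.append_assoc]

-- hence flip_level_alt is flipSegB on the whole list
lemma alt_eq_seg (level index : Int) (node_vals : List Int) :
    flip_level_alt level index node_vals = flipSegB (pvBits level index) node_vals := by
  unfold flip_level_alt
  have h := foldB_eq (pvBits level index) [] node_vals []
  simpa using h

-- map (pyGetD vals · 0) over range [a,b) is the slice vals[a:b]
lemma map_getD_pyRange (vals : List Int) (a b : Nat) (hab : a ≤ b) (hb : b ≤ vals.length) :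
    (PySem.List.pyRange (a : Int) (b : Int) 1).map (fun i => PySem.List.pyGetD vals i 0)
      = (vals.drop a).take (b - a) := by
  rw [PySem.List.pyRange_one]
  have hto : (((b : Int) - (a : Int))).toNat = b - a := by omega
  rw [hto, List.map_map]
  apply List.ext_getElem
  · simp; omega
  · intro k h1 h2
    simp only [List.getElem_map, List.getElem_range, Function.comp]
    have : ((a : Int) + (k : Int)) = ((a + k : Nat) : Int) := by push_cast; ring
    rw [this, PySem.List.pyGetD_natCast]
    have hk : a + k < vals.length := by simp at h1; omega
    rw [List.getD_eq_getElem vals 0 hk]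
    simp [List.getElem_take, List.getElem_drop]

-- map (pyGetD w (· - s) 0) over range [s,e) is w itself, when w has length e - s
lemma map_getD_shift_pyRange (w : List Int) (s e : Nat) (hw : w.length = e - s) (hse : s ≤ e) :
    (PySem.List.pyRange (s : Int) (e : Int) 1).map (fun i => PySem.List.pyGetD w (i - (s : Int)) 0) = w := by
  rw [PySem.List.pyRange_one]
  have hto : (((e : Int) - (s : Int))).toNat = e - s := by omega
  rw [hto, List.map_map]
  apply List.ext_getElem
  · simp; omega
  · intro k h1 h2
    simp only [List.getElem_map, List.getElem_range, Function.comp]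
    have : ((s : Int) + (k : Int) - (s : Int)) = ((k : Nat) : Int) := by ring
    rw [this, PySem.List.pyGetD_natCast]
    exact List.getD_eq_getElem w 0 h2

-- A's comprehension replaces positions [s,e) by w and keeps the rest
lemma comprehension_eq (vals w : List Int) (s e : Nat) (hse : s ≤ e) (hel : e ≤ vals.length)
    (hw : w.length = e - s) :
    (PySem.List.pyRange 0 (vals.length : Int) 1).map
        (fun i => if (s : Int) ≤ i ∧ i < (e : Int) then PySem.List.pyGetD w (i - (s : Int)) 0
                  else PySem.List.pyGetD vals i 0)
      = vals.take s ++ w ++ vals.drop e := by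
  have hsplit1 := PySem.List.pyRange_one_append ((0:Nat) : Int) ((s:Nat) : Int) ((vals.length:Nat) : Int)
      (by exact_mod_cast Nat.zero_le s) (by exact_mod_cast le_trans hse hel)
  have hsplit2 := PySem.List.pyRange_one_append ((s:Nat) : Int) ((e:Nat) : Int) ((vals.length:Nat) : Int)
      (by exact_mod_cast hse) (by exact_mod_cast hel)
  have h1 : (PySem.List.pyRange ((0:Nat) : Int) ((s:Nat) : Int) 1).map
      (fun i => if (s : Int) ≤ i ∧ i < (e : Int) then PySem.List.pyGetD w (i - (s : Int)) 0
                else PySem.List.pyGetD vals i 0) = vals.take s := by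
    rw [List.map_congr_left (g := fun i => PySem.List.pyGetD vals i 0)
      (by intro i hi
          rw [PySem.List.mem_pyRange_one] at hi
          have hni : ¬ ((s : Int) ≤ i ∧ i < (e : Int)) := by omega
          simp [hni])]
    rw [map_getD_pyRange vals 0 s (Nat.zero_le s) (le_trans hse hel)]
    simp
  have h2 : (PySem.List.pyRange ((s:Nat) : Int) ((e:Nat) : Int) 1).map
      (fun i => if (s : Int) ≤ i ∧ i < (e : Int) then PySem.List.pyGetD w (i - (s : Int)) 0
                else PySem.List.pyGetD vals i 0) = w := by
    rw [List.map_congr_left (g := fun i => PySem.List.pyGetD w (i - (s : Int)) 0)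
      (by intro i hi
          rw [PySem.List.mem_pyRange_one] at hi
          have hyi : ((s : Int) ≤ i ∧ i < (e : Int)) := by omega
          simp [hyi])]
    exact map_getD_shift_pyRange w s e hw hse
  have h3 : (PySem.List.pyRange ((e:Nat) : Int) ((vals.length:Nat) : Int) 1).map
      (fun i => if (s : Int) ≤ i ∧ i < (e : Int) then PySem.List.pyGetD w (i - (s : Int)) 0
                else PySem.List.pyGetD vals i 0) = vals.drop e := by
    rw [List.map_congr_left (g := fun i => PySem.List.pyGetD vals i 0)
      (by intro i hi
          rw [PySem.List.mem_pyRange_one] at hi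
          have hni : ¬ ((s : Int) ≤ i ∧ i < (e : Int)) := by omega
          simp [hni])]
    rw [map_getD_pyRange vals e vals.length hel (le_refl _)]
    simp
  rw [Nat.cast_zero] at hsplit1 h1
  rw [hsplit1, hsplit2, List.map_append, List.map_append, h1, h2, h3, List.append_assoc]

-- the loop of A, started at bounds (s, e) of vals, leaves the outside untouched and acts as flipSegB on the segment
lemma loopA_eq (bits : List Char) : ∀ (s e : Nat) (vals : List Int), s ≤ e → e ≤ vals.length →
    ((bits.foldl flipStepA ((s : Int), (e : Int), vals)).2.2
      = vals.take s ++ flipSegB bits ((vals.drop s).take (e - s)) ++ vals.drop e) := by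
  induction bits with
  | nil =>
    intro s e vals hse hel
    simp only [List.foldl_nil, flipSegB]
    have h1 : (vals.drop s).take (e - s) ++ vals.drop e = vals.drop s := by
      have h2 : vals.drop e = (vals.drop s).drop (e - s) := by
        rw [List.drop_drop]; congr 1; omega
      rw [h2, List.take_append_drop]
    conv_lhs => rw [← List.take_append_drop s vals, ← h1]
    rw [List.append_assoc]
  | cons c rest ih =>
    intro s e vals hse hel
    have hmid : PySem.Int.floordiv ((s : Int) + (e : Int)) 2 = (((s + e) / 2 : Nat) : Int) := by
      exact_mod_cast PySem.Int.floordiv_natCast (s + e) 2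
    set m : Nat := (e - s) / 2 with hm
    have hm2 : (s + e) / 2 = s + m := by omega
    set seg : List Int := (vals.drop s).take (e - s) with hsegdef
    have hseglen : seg.length = e - s := by
      simp [hsegdef]; omega
    have hsegtake : seg.take m = (vals.drop s).take m := by
      rw [hsegdef, List.take_take]; congr 1; omega
    have hsegdrop : seg.drop m = (vals.drop (s + m)).take (e - (s + m)) := by
      have e1 : e - s - m = e - (s + m) := by omega
      rw [hsegdef, List.drop_take, List.drop_drop, e1]
    have hrest : ((vals.drop (s + m)).take (e - (s + m))) ++ vals.drop e = vals.drop (s + m) := by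
      have h2 : vals.drop e = (vals.drop (s + m)).drop (e - (s + m)) := by
        rw [List.drop_drop]; congr 1; omega
      rw [h2, List.take_append_drop]
    rw [List.foldl_cons]
    by_cases hc : c = '1'
    · -- '1' branch: halves swapped, start := mid
      have hflip : PySem.List.slice vals (some (((s + m : Nat)) : Int)) (some ((e : Nat) : Int))
            ++ PySem.List.slice vals (some ((s : Nat) : Int)) (some (((s + m : Nat)) : Int))
          = seg.drop m ++ seg.take m := by
        rw [PySem.List.slice_natCast, PySem.List.slice_natCast, hsegdrop, hsegtake]
        have e1 : s + m - s = m := by omega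
        rw [e1]
      have hwlen : (seg.drop m ++ seg.take m).length = e - s := by
        rw [List.length_append, List.length_take, List.length_drop, hseglen]; omega
      have hstep : flipStepA ((s : Int), (e : Int), vals) c
          = (((s + m : Nat) : Int), (e : Int), vals.take s ++ (seg.drop m ++ seg.take m) ++ vals.drop e) := by
        simp only [flipStepA, hmid, hm2]
        rw [hc, if_pos rfl, hflip,
          comprehension_eq vals (seg.drop m ++ seg.take m) s e hse hel hwlen]
      rw [hstep]
      have hlen' : (vals.take s ++ (seg.drop m ++ seg.take m) ++ vals.drop e).length = vals.length := by
        simp [hseglen]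
        omega
      have hih := ih (s + m) e (vals.take s ++ (seg.drop m ++ seg.take m) ++ vals.drop e)
        (by omega) (by rw [hlen']; omega)
      rw [hih]
      -- now rewrite the three pieces of the new list
      set nw : List Int := seg.drop m ++ seg.take m with hnw
      have hnwlen : nw.length = e - s := by simp [hnw, hseglen]; omega
      have htk : (vals.take s ++ nw ++ vals.drop e).take (s + m)
          = vals.take s ++ nw.take m := by
        rw [List.append_assoc, List.take_append, List.take_take,
            List.take_append]
        have hl1 : (vals.take s).length = s := by simp; omega
        have h0 : (s + m - (vals.take s).length) = m := by rw [hl1]; omega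
        have hmin : min (s + m) s = s := by omega
        rw [h0, hmin]
        have : ((vals.drop e).take (m - nw.length)) = [] := by
          have : m - nw.length = 0 := by rw [hnwlen]; omega
          rw [this, List.take_zero]
        rw [this, List.append_nil]
      have hdp : (vals.take s ++ nw ++ vals.drop e).drop (s + m)
          = nw.drop m ++ vals.drop e := by
        rw [List.append_assoc, List.drop_append]
        have hl1 : (vals.take s).length = s := by simp; omega
        have h0 : (vals.take s).drop (s + m) = [] := by
          apply List.drop_eq_nil_of_le; omega
        rw [h0, List.nil_append, hl1]
        have h1 : s + m - s = m := by omega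
        rw [h1, List.drop_append]
        have h2 : m - nw.length = 0 := by rw [hnwlen]; omega
        rw [h2, List.drop_zero]
      have htk2 : (nw.drop m ++ vals.drop e).take (e - (s + m)) = nw.drop m := by
        have hl : (nw.drop m).length = e - (s + m) := by simp [hnwlen]; omega
        rw [List.take_append]
        have h2 : e - (s + m) - (nw.drop m).length = 0 := by rw [hl]; omega
        rw [h2, List.take_zero, List.append_nil, ← hl, List.take_length]
      have hdp2 : (vals.take s ++ nw ++ vals.drop e).drop e = vals.drop e := by
        rw [List.append_assoc, List.drop_append]
        have h0 : (vals.take s).drop e = [] := by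
          apply List.drop_eq_nil_of_le; simp; omega
        rw [h0, List.nil_append, List.drop_append]
        have hl1 : (vals.take s).length = s := by simp; omega
        rw [hl1]
        have h2 : e - s - nw.length = 0 := by rw [hnwlen]; omega
        have h3 : (nw.drop (e - s)) = [] := by
          apply List.drop_eq_nil_of_le; rw [hnwlen]
        rw [h2, h3, List.nil_append, List.drop_zero]
      rw [htk, hdp, htk2, hdp2]
      -- and the right-hand side
      have hB : flipSegB (c :: rest) seg = nw.take m ++ flipSegB rest (nw.drop m) := by
        simp only [flipSegB]
        rw [hc, if_pos rfl, hseglen, ← hm]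
      rw [hB]
      simp [List.append_assoc]
    · -- other branch: end := mid
      have hstep : flipStepA ((s : Int), (e : Int), vals) c
          = ((s : Int), (((s + m : Nat)) : Int), vals) := by
        simp only [flipStepA, hmid, hm2]
        rw [if_neg hc]
      rw [hstep]
      have hih := ih s (s + m) vals (by omega) (by omega)
      rw [hih]
      have hB : flipSegB (c :: rest) seg = flipSegB rest (seg.take m) ++ seg.drop m := by
        simp only [flipSegB]
        rw [if_neg hc, hseglen, ← hm]
      rw [hB]
      have harg : (vals.drop s).take (s + m - s) = seg.take m := by
        rw [hsegtake]; congr 1; omega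
      have hjoin : vals.drop (s + m) = seg.drop m ++ vals.drop e := by
        rw [hsegdrop]; exact hrest.symm
      rw [harg, hjoin]
      simp [List.append_assoc]

-- ===== VERDICT (by name: the statement is the Claim_ definition above) =====
theorem flip_level_spec : Claim_equal_flip_level := by
  intro level index node_vals _
  unfold Spec_flip_level flip_level
  rw [alt_eq_seg]
  have h := loopA_eq (pvBits level index) 0 node_vals.length node_vals (Nat.zero_le _) (le_refl _)
  simpa using h
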